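-- pv_equiv track=rewrite | github.com/vinchinzu/euler | python/322.py | _count_digitwise_superset
-- ===== SOURCE A (Python) =====
-- from functools import lru_cache
-- from typing import Dict, List, Tuple
--
-- def to_base_digits_msb(num: int, base: int) -> List[int]:
--     """Return digits of ``num`` in the given ``base``, most significant first.
--
--     For ``num == 0`` this returns ``[0]``.
--     """
--
--     if num == 0:
--         return [0]
--
--     digits: List[int] = []
--     while num > 0:
--         digits.append(num % base)
--         num //= base
--     return digits[::-1]
--
-- def pad_digits_left(digits: List[int], length: int) -> List[int]:
--     """Return a new list of digits left-padded with zeros to ``length``."""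
--
--     pad_len = max(0, length - len(digits))
--     if pad_len:
--         return [0] * pad_len + digits
--     return digits[:]
--
-- def _count_digitwise_superset(lower: int, upper: int, p: int) -> int:
--     """Count x in [lower, upper] with digits(x)_p >= digits(lower)_p.
--
--     The comparison is digit-wise (per position) using base-p digits.
--     """
--
--     if lower > upper:
--         return 0
--
--     n_digits = to_base_digits_msb(lower, p)
--     upper_digits = to_base_digits_msb(upper, p)
--
--     max_len = max(len(n_digits), len(upper_digits))
--     n_digits = pad_digits_left(n_digits, max_len)
--     upper_digits = pad_digits_left(upper_digits, max_len)
--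
--     @lru_cache(maxsize=None)
--     def dp(pos: int, tight: bool) -> int:
--         if pos == max_len:
--             return 1
--
--         max_digit = upper_digits[pos] if tight else p - 1
--         min_digit = n_digits[pos]
--
--         if max_digit < min_digit:
--             return 0
--
--         total_count = 0
--         for digit in range(min_digit, max_digit + 1):
--             next_tight = tight and (digit == max_digit)
--             total_count += dp(pos + 1, next_tight)
--         return total_count
--
--     return dp(0, True)
-- ===== SOURCE B (Python) =====
-- def _digits_msb(num, base):
--     if num == 0:
--         return [0]
--     ds = []
--     while num > 0:
--         ds.append(num % base)
--         num //= base
--     return ds[::-1]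
--
--
-- def _count_digitwise_superset(lower, upper, p):
--     if lower > upper:
--         return 0
--
--     lo = _digits_msb(lower, p)
--     up = _digits_msb(upper, p)
--     length = max(len(lo), len(up))
--     lo = [0] * (length - len(lo)) + lo
--     up = [0] * (length - len(up)) + up
--
--     # suf[i] = number of free digit suffixes from position i on
--     suf = [1] * (length + 1)
--     for i in range(length - 1, -1, -1):
--         suf[i] = suf[i + 1] * max(0, p - lo[i])
--
--     total = 0
--     for pos in range(length):
--         if up[pos] < lo[pos]:
--             return total
--         total += (up[pos] - lo[pos]) * suf[pos + 1]
--     return total + 1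
-- ===== Notes on version B (the rewrite author's own statement) =====
-- stated objective: faster
-- what changed: Replaces the memoized digit-DP whose inner loop sums over every digit value in [min_digit, max_digit] with a single forward scan that multiplies a closed-form per-position factor (upper_digit - lower_digit) by a precomputed suffix product of free-digit counts, removing the O(p) inner loop entirely.
import Mathlib
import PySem

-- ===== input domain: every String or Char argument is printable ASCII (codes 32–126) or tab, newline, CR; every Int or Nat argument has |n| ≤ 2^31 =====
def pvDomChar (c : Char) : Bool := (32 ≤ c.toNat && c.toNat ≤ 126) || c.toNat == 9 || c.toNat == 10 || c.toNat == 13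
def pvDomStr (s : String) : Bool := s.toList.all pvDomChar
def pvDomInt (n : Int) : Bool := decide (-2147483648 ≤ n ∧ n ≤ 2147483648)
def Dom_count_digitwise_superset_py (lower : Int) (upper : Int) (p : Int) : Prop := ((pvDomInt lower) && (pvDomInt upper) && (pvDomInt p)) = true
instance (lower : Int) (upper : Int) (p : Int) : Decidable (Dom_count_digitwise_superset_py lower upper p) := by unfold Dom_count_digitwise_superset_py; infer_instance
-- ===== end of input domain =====

-- B replaces A's memoized digit-DP (inner loop over all digit values, O(max_len * p)) by a
-- single forward scan with a precomputed suffix product of free-digit counts (O(max_len)).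


-- ===== PORT A =====
-- while num > 0: digits.append(num % base); num //= base
-- fuel = num.toNat always suffices: each iteration strictly decreases a positive num
-- (for base ≥ 2 it divides; for base < 0 one step makes it negative); for base 0/1 with
-- num > 0 Python raises/diverges — those inputs are excluded by Pre_ below.
def pvToBaseAuxA (fuel : Nat) (num base : Int) : List Int :=
  match fuel with
  | 0 => []
  | f + 1 =>
      if num > 0 then PySem.Int.mod num base :: pvToBaseAuxA f (PySem.Int.floordiv num base) base
      else []

def to_base_digits_msb_py (num base : Int) : List Int :=
  if num = 0 then [0] else (pvToBaseAuxA num.toNat num base).reverse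

def pad_digits_left_py (digits : List Int) (length : Nat) : List Int :=
  List.replicate (length - digits.length) 0 ++ digits

-- dp(pos, tight); Python stops at pos == max_len and dp is only invoked with pos ≤ max_len,
-- so the guard 'maxLen ≤ pos' is exact.  upper_digits[pos] / n_digits[pos] are always
-- in range (pos < max_len = length), so getD is exact indexing.
def dpA (p : Int) (nd ud : List Int) (maxLen : Nat) (pos : Nat) (tight : Bool) : Int :=
  if _h : maxLen ≤ pos then 1
  else
    let maxDigit := if tight then ud.getD pos 0 else p - 1
    let minDigit := nd.getD pos 0
    if maxDigit < minDigit then 0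
    else
      (PySem.List.pyRange minDigit (maxDigit + 1) 1).foldl
        (fun acc d => acc + dpA p nd ud maxLen (pos + 1) (tight && (d == maxDigit))) 0
termination_by maxLen - pos
decreasing_by omega

def count_digitwise_superset_py (lower : Int) (upper : Int) (p : Int) : Int :=
  if lower > upper then 0
  else
    let nDigits0 := to_base_digits_msb_py lower p
    let upperDigits0 := to_base_digits_msb_py upper p
    let maxLen := max nDigits0.length upperDigits0.length
    let nDigits := pad_digits_left_py nDigits0 maxLen
    let upperDigits := pad_digits_left_py upperDigits0 maxLen
    dpA p nDigits upperDigits maxLen 0 true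

-- ===== PORT B =====
-- same digit-extraction while loop as Source B's _digits_msb
def pvDigitsAuxB (fuel : Nat) (num base : Int) : List Int :=
  match fuel with
  | 0 => []
  | f + 1 =>
      if num > 0 then PySem.Int.mod num base :: pvDigitsAuxB f (PySem.Int.floordiv num base) base
      else []

def digits_msb_alt (num base : Int) : List Int :=
  if num = 0 then [0] else (pvDigitsAuxB num.toNat num base).reverse

-- suffix products suf[i] = suf[i+1] * max(0, p - lo[i]), built back-to-front
def sufList (p : Int) (lo : List Int) : List Int :=
  lo.foldr (fun d acc => (max 0 (p - d) * acc.headD 1) :: acc) [1]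

-- forward scan: walk lo/up together with the tail of the suffix-product list
def bLoop (los ups sufs : List Int) (total : Int) : Int :=
  match los, ups, sufs with
  | l :: lt, u :: ut, _ :: st =>
      if u < l then total else bLoop lt ut st (total + (u - l) * st.headD 1)
  | _, _, _ => total + 1

def count_digitwise_superset_py_alt (lower : Int) (upper : Int) (p : Int) : Int :=
  if lower > upper then 0
  else
    let lo0 := digits_msb_alt lower p
    let up0 := digits_msb_alt upper p
    let len := max lo0.length up0.length
    let lo := List.replicate (len - lo0.length) 0 ++ lo0
    let up := List.replicate (len - up0.length) 0 ++ up0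
    bLoop lo up (sufList p lo) 0

-- ===== PRECONDITION & SPEC =====
-- Pre_ excludes exactly the inputs where A does not return: with base p = 0 A raises
-- ZeroDivisionError and with p = 1 it loops forever, in both cases only when some digit
-- extraction actually runs (lower ≤ upper and upper > 0).  A returns on every other input
-- (including negative p and negative bounds) and those all stay inside Pre_.
def Pre_count_digitwise_superset_py (lower : Int) (upper : Int) (p : Int) : Prop :=
  lower > upper ∨ (p ≠ 0 ∧ p ≠ 1) ∨ upper ≤ 0
instance (lower : Int) (upper : Int) (p : Int) : Decidable (Pre_count_digitwise_superset_py lower upper p) := by unfold Pre_count_digitwise_superset_py; infer_instance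

def pvWitness_count_digitwise_superset_py : Int × Int × Int := (3, 10, 2)

def Spec_count_digitwise_superset_py (lower : Int) (upper : Int) (p : Int) (out : Int) : Prop := out = count_digitwise_superset_py_alt lower upper p
instance (lower : Int) (upper : Int) (p : Int) (out : Int) : Decidable (Spec_count_digitwise_superset_py lower upper p out) := by unfold Spec_count_digitwise_superset_py; infer_instance

-- ===== CLAIM (what is proved, stated in full; the proofs are below) =====
def Claim_equal_count_digitwise_superset_py : Prop := ∀ (lower : Int) (upper : Int) (p : Int), Dom_count_digitwise_superset_py lower upper p → Pre_count_digitwise_superset_py lower upper p → Spec_count_digitwise_superset_py lower upper p (count_digitwise_superset_py lower upper p)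

-- ===== LEMMAS AND PROOFS =====

-- the two digit-extraction helpers are textually identical
theorem pvDigitsAux_eq (fuel : Nat) (num base : Int) :
    pvDigitsAuxB fuel num base = pvToBaseAuxA fuel num base := by
  induction fuel generalizing num with
  | zero => rfl
  | succ f ih => simp [pvDigitsAuxB, pvToBaseAuxA, ih]

theorem digits_msb_alt_eq (num base : Int) :
    digits_msb_alt num base = to_base_digits_msb_py num base := by
  simp [digits_msb_alt, to_base_digits_msb_py, pvDigitsAux_eq]

-- abstract values of the two loops
def prodTail (p : Int) : List Int -> Int
  | [] => 1
  | d :: t => max 0 (p - d) * prodTail p t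

def tightCount (p : Int) : List Int -> List Int -> Int
  | l :: lt, u :: ut => if u < l then 0 else (u - l) * prodTail p lt + tightCount p lt ut
  | _, _ => 1

theorem sufList_head (p : Int) (l : List Int) : (sufList p l).headD 1 = prodTail p l := by
  induction l with
  | nil => rfl
  | cons d t ih =>
      show max 0 (p - d) * (sufList p t).headD 1 = prodTail p (d :: t)
      rw [ih]; rfl

theorem bLoop_eq (p : Int) (lo : List Int) :
    forall (up : List Int) (t : Int), bLoop lo up (sufList p lo) t = t + tightCount p lo up := by
  induction lo with
  | nil => intro up t; cases up <;> simp [bLoop, tightCount]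
  | cons d lt ih =>
      intro up t
      cases up with
      | nil => simp [bLoop, tightCount]
      | cons u ut =>
          show bLoop (d :: lt) (u :: ut) ((max 0 (p - d) * (sufList p lt).headD 1) :: sufList p lt) t = _
          rw [bLoop]
          by_cases h : u < d
          · simp [h, tightCount]
          · simp only [h, if_false, tightCount]
            rw [ih ut, sufList_head]
            ring

theorem foldl_add_const (l : List Int) (C : Int) :
    forall acc : Int, l.foldl (fun a (_ : Int) => a + C) acc = acc + l.length * C := by
  induction l with
  | nil => intro acc; simp
  | cons x t ih => intro acc; simp [List.foldl_cons, ih]; ring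

theorem drop_cons_getD (l : List Int) (pos : Nat) (h : pos < l.length) :
    l.drop pos = l.getD pos 0 :: l.drop (pos + 1) := by
  rw [List.drop_eq_getElem_cons h, List.getD_eq_getElem?_getD, List.getElem?_eq_getElem h]
  rfl

theorem dpF (p : Int) (nd ud : List Int) (maxLen : Nat) :
    forall pos : Nat, nd.length = maxLen -> pos <= maxLen ->
      dpA p nd ud maxLen pos false = prodTail p (nd.drop pos) := by
  intro pos
  induction hfuel : maxLen - pos generalizing pos with
  | zero =>
      intro hlen hpos
      rw [dpA, dif_pos (by omega : maxLen <= pos),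
          List.drop_eq_nil_of_le (by omega : nd.length <= pos)]
      rfl
  | succ k ih =>
      intro hlen hpos
      have hlt : pos < maxLen := by omega
      have hdrop := drop_cons_getD nd pos (by omega)
      have ihv : dpA p nd ud maxLen (pos + 1) false = prodTail p (nd.drop (pos + 1)) :=
        ih (pos + 1) (by omega) hlen (by omega)
      rw [dpA, dif_neg (by omega : ¬ maxLen <= pos)]
      simp only [Bool.false_and, Bool.false_eq_true, if_false]
      by_cases h : p - 1 < nd.getD pos 0
      · rw [if_pos h, hdrop]
        simp only [prodTail]
        have : max 0 (p - nd.getD pos 0) = 0 := by omega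
        rw [this]; ring
      · rw [if_neg h]
        rw [show (fun (acc d : Int) => acc + dpA p nd ud maxLen (pos + 1) false)
              = (fun (acc : Int) (_ : Int) => acc + dpA p nd ud maxLen (pos + 1) false) from rfl]
        rw [foldl_add_const, ihv, PySem.List.length_pyRange_one, hdrop]
        simp only [prodTail]
        have h1 : ((p - 1 + 1 - nd.getD pos 0).toNat : Int) = p - nd.getD pos 0 := by omega
        have h2 : max 0 (p - nd.getD pos 0) = p - nd.getD pos 0 := by omega
        rw [h1, h2]; ring

theorem dpT (p : Int) (nd ud : List Int) (maxLen : Nat) :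
    forall pos : Nat, nd.length = maxLen -> ud.length = maxLen -> pos <= maxLen ->
      dpA p nd ud maxLen pos true = tightCount p (nd.drop pos) (ud.drop pos) := by
  intro pos
  induction hfuel : maxLen - pos generalizing pos with
  | zero =>
      intro hnd hud hpos
      rw [dpA, dif_pos (by omega : maxLen <= pos),
          List.drop_eq_nil_of_le (by omega : nd.length <= pos)]
      rfl
  | succ k ih =>
      intro hnd hud hpos
      have hlt : pos < maxLen := by omega
      have hdropn := drop_cons_getD nd pos (by omega)
      have hdropu := drop_cons_getD ud pos (by omega)
      rw [dpA, dif_neg (by omega : ¬ maxLen <= pos)]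
      simp only [Bool.true_and, if_true]
      rw [hdropn, hdropu]
      simp only [tightCount]
      by_cases h : ud.getD pos 0 < nd.getD pos 0
      · rw [if_pos h, if_pos h]
      · rw [if_neg h, if_neg h]
        have hvu : nd.getD pos 0 <= ud.getD pos 0 := by omega
        rw [PySem.List.pyRange_one_succ_right hvu, List.foldl_append]
        rw [PySem.List.foldl_congr_mem (PySem.List.pyRange (nd.getD pos 0) (ud.getD pos 0))
              (fun acc d => acc + dpA p nd ud maxLen (pos + 1) (d == ud.getD pos 0))
              (fun (acc : Int) (_ : Int) => acc + dpA p nd ud maxLen (pos + 1) false) 0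
              (by
                intro acc d hd
                have hdu : d < ud.getD pos 0 := (PySem.List.mem_pyRange_one.1 hd).2
                have : (d == ud.getD pos 0) = false := by
                  simp only [beq_eq_false_iff_ne, ne_eq]; omega
                simp only [this])]
        rw [foldl_add_const, PySem.List.length_pyRange_one]
        simp only [List.foldl_cons, List.foldl_nil, beq_self_eq_true]
        rw [dpF p nd ud maxLen (pos + 1) hnd (by omega),
            ih (pos + 1) (by omega) hnd hud (by omega)]
        have h1 : ((ud.getD pos 0 - nd.getD pos 0).toNat : Int) = ud.getD pos 0 - nd.getD pos 0 := by omega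
        rw [h1]; ring

-- ===== VERDICT (by name: the statement is the Claim_ definition above) =====
theorem count_digitwise_superset_py_spec : Claim_equal_count_digitwise_superset_py := by
  intro lower upper p _ _
  unfold Spec_count_digitwise_superset_py
  unfold count_digitwise_superset_py count_digitwise_superset_py_alt
  by_cases hlu : lower > upper
  · simp [hlu]
  · simp only [hlu, if_false]
    rw [digits_msb_alt_eq, digits_msb_alt_eq]
    set nd0 := to_base_digits_msb_py lower p with hnd0
    set ud0 := to_base_digits_msb_py upper p with hud0
    set L := max nd0.length ud0.length with hL
    have hnd : (pad_digits_left_py nd0 L).length = L := by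
      simp [pad_digits_left_py]; omega
    have hud : (pad_digits_left_py ud0 L).length = L := by
      simp [pad_digits_left_py]; omega
    rw [dpT p _ _ L 0 hnd hud (by omega)]
    simp only [List.drop_zero]
    rw [show List.replicate (L - nd0.length) 0 ++ nd0 = pad_digits_left_py nd0 L from rfl,
        show List.replicate (L - ud0.length) 0 ++ ud0 = pad_digits_left_py ud0 L from rfl,
        bLoop_eq]
    ring
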